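-- pv_equiv track=rewrite | github.com/AymenGa/usa-business-directory-scraper | scraper/fashion/etsy_shops.py | get_unique_shops
-- ===== SOURCE A (Python) =====
-- def get_unique_shops(data):
--     """Extract unique (shop_name, state, city) combos from marketplace data.
--     Returns dict: shop_name -> list of (state, city) pairs where they appear."""
--     shops = {}
--     for row in data:
--         shop = (row.get("Store Name") or "").strip()
--         if not shop:
--             continue
--         state = (row.get("State") or "").strip()
--         city = (row.get("City") or "").strip()
--         if shop not in shops:
--             shops[shop] = []
--         if (state, city) not in shops[shop]:
--             shops[shop].append((state, city))
--     return shops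
-- ===== SOURCE B (Python) =====
-- def get_unique_shops(data):
--     """Extract unique (shop_name, state, city) combos from marketplace data.
--     Returns dict: shop_name -> list of (state, city) pairs where they appear."""
--     groups = {}
--     for row in data:
--         shop = (row.get("Store Name") or "").strip()
--         if not shop:
--             continue
--         state = (row.get("State") or "").strip()
--         city = (row.get("City") or "").strip()
--         groups.setdefault(shop, []).append((state, city))
--     return {shop: list(dict.fromkeys(pairs)) for shop, pairs in groups.items()}
-- ===== Notes on version B (the rewrite author's own statement) =====
-- stated objective: alternative
-- what changed: A's in-loop per-row membership test on the growing per-shop list is removed: B gathers every (state, city) pair per shop in one pass with setdefault(...).append and then deduplicates each gathered list in a separate second pass with dict.fromkeys (hash-based, first-seen order).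
import Mathlib
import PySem

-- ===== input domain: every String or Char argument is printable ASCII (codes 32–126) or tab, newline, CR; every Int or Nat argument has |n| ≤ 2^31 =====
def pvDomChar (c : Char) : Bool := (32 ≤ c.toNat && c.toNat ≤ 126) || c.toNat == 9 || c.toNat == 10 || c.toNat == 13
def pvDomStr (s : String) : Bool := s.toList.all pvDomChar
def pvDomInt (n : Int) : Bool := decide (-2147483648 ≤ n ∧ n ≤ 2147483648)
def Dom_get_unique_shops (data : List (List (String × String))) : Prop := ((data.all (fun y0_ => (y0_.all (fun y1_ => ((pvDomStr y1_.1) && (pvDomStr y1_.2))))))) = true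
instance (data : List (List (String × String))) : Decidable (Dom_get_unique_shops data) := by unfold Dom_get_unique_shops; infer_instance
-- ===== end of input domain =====

-- B gathers all (state, city) pairs per shop in one pass without membership tests, then
-- deduplicates each gathered list in a second pass (dict.fromkeys); A dedups inside the loop.

-- shared field extraction: (row.get(k) or "").strip()
def pvField (row : List (String × String)) (k : String) : String :=
  PySem.Str.strip (((PySem.Dict.mk row).get? k).getD "")

-- ===== PORT A =====
def pvStepA (shops : PySem.Dict String (List (String × String)))
    (row : List (String × String)) : PySem.Dict String (List (String × String)) :=
  let shop := pvField row "Store Name"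
  if shop = "" then shops else
    let state := pvField row "State"
    let city := pvField row "City"
    let shops1 := if shops.contains shop then shops else shops.insert shop []
    let cur := shops1.getD shop []
    if (state, city) ∈ cur then shops1 else shops1.insert shop (cur ++ [(state, city)])

def get_unique_shops (data : List (List (String × String))) : List (String × List (String × String)) :=
  (data.foldl pvStepA PySem.Dict.empty).items

-- ===== PORT B =====
def pvStepB (groups : PySem.Dict String (List (String × String)))
    (row : List (String × String)) : PySem.Dict String (List (String × String)) :=
  let shop := pvField row "Store Name"
  if shop = "" then groups else
    groups.modify shop [] (· ++ [(pvField row "State", pvField row "City")])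

def get_unique_shops_alt (data : List (List (String × String))) : List (String × List (String × String)) :=
  ((data.foldl pvStepB PySem.Dict.empty).items).map (fun q => (q.1, PySem.List.dedup q.2))

-- ===== PRECONDITION & SPEC =====
def Spec_get_unique_shops (data : List (List (String × String))) (out : List (String × List (String × String))) : Prop := out = get_unique_shops_alt data
instance (data : List (List (String × String))) (out : List (String × List (String × String))) : Decidable (Spec_get_unique_shops data out) := by unfold Spec_get_unique_shops; infer_instance

-- ===== CLAIM (what is proved, stated in full; the proofs are below) =====
def Claim_equal_get_unique_shops : Prop := ∀ (data : List (List (String × String))), Dom_get_unique_shops data → Spec_get_unique_shops data (get_unique_shops data)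

-- ===== LEMMAS AND PROOFS =====

-- ordered dedup of a snoc: the new element survives only if unseen
lemma pv_ofList_snoc {α : Type} [BEq α] [LawfulBEq α] (l : List α) (x : α) :
    PySem.Set.ofList (l ++ [x]) =
      if x ∈ l then PySem.Set.ofList l else PySem.Set.ofList l ++ [x] := by
  rw [PySem.Set.ofList_eq_foldl, PySem.Set.ofList_eq_foldl, List.foldl_append]
  simp [PySem.Set.add, PySem.Set.contains, ← PySem.Set.ofList_eq_foldl,
    PySem.Set.mem_ofList]

-- lookup through an items-level value map
lemma pv_get?_of_items_map (dA dB : PySem.Dict String (List (String × String)))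
    (h : dA.items = dB.items.map (fun q => (q.1, PySem.List.dedup q.2))) (k : String) :
    dA.get? k = (dB.get? k).map PySem.List.dedup := by
  obtain ⟨lA⟩ := dA
  obtain ⟨lB⟩ := dB
  subst h
  induction lB with
  | nil => rfl
  | cons q t ih =>
    obtain ⟨qk, qv⟩ := q
    simp only [List.map_cons, PySem.Dict.get?_mk_cons]
    by_cases hq : (qk == k) = true
    · rw [if_pos hq, if_pos hq]; rfl
    · rw [if_neg hq, if_neg hq]; exact ih

-- main invariant: A's dict is B's dict with every value deduplicated
lemma pv_fold_inv (rows : List (List (String × String)))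
    (dA dB : PySem.Dict String (List (String × String)))
    (hnd : dB.keys.Nodup)
    (h : dA.items = dB.items.map (fun q => (q.1, PySem.List.dedup q.2))) :
    (rows.foldl pvStepA dA).items =
      ((rows.foldl pvStepB dB).items).map (fun q => (q.1, PySem.List.dedup q.2)) := by
  induction rows generalizing dA dB with
  | nil => simpa using h
  | cons row t ih =>
    simp only [List.foldl_cons]
    by_cases hsh : pvField row "Store Name" = ""
    · rw [show pvStepA dA row = dA by simp [pvStepA, hsh],
        show pvStepB dB row = dB by simp [pvStepB, hsh]]
      exact ih dA dB hnd h
    · -- non-empty shop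
      set shop := pvField row "Store Name" with hshop
      set p : String × String := (pvField row "State", pvField row "City") with hp
      have hcont : dA.contains shop = dB.contains shop := by
        rw [PySem.Dict.contains_eq_isSome_get?, PySem.Dict.contains_eq_isSome_get?,
          pv_get?_of_items_map dA dB h]
        cases dB.get? shop <;> rfl
      have hB : pvStepB dB row = dB.insert shop ((dB.getD shop []) ++ [p]) := by
        simp only [pvStepB, PySem.Dict.modify]
        rw [← hshop, if_neg hsh, ← hp]
      have hndB : (pvStepB dB row).keys.Nodup := by
        rw [hB]; exact PySem.Dict.nodup_keys_insert _ _ _ hnd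
      refine ih _ _ hndB ?_
      by_cases hc : dB.contains shop = true
      · -- shop already present
        obtain ⟨v, hv⟩ : ∃ v, dB.get? shop = some v := by
          rw [PySem.Dict.contains_eq_isSome_get?] at hc
          exact Option.isSome_iff_exists.mp hc
        have hgB : dB.getD shop [] = v := PySem.Dict.getD_of_get?_eq_some _ _ hv
        have hgA : dA.getD shop [] = PySem.List.dedup v := by
          rw [PySem.Dict.getD_eq_get?_getD, pv_get?_of_items_map dA dB h, hv]; rfl
        have hcA : dA.contains shop = true := by rw [hcont]; exact hc
        have hval : ∀ q ∈ dB.items, q.1 = shop → q.2 = v := by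
          intro q hq hq1
          have := PySem.Dict.get?_of_mem_items (d := dB) (k := q.1) (v := q.2)
            (by simpa using hq) hnd
          rw [hq1, hv] at this
          exact (Option.some_inj.mp this).symm
        have hA : pvStepA dA row =
            (if p ∈ PySem.List.dedup v then dA
             else dA.insert shop (PySem.List.dedup v ++ [p])) := by
          simp only [pvStepA]
          rw [← hshop, if_neg hsh, ← hp, if_pos hcA, hgA]
        have hitemsB : (pvStepB dB row).items =
            dB.items.map (fun q => if (q.1 == shop) = true then (shop, v ++ [p]) else q) := by
          rw [hB, hgB, PySem.Dict.items_insert_of_contains _ _ hc]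
        by_cases hmem : p ∈ v
        · -- duplicate pair: A unchanged, B appends it but dedup absorbs it
          have hmem2 : p ∈ PySem.List.dedup v := (PySem.List.mem_dedup _ _).mpr hmem
          rw [hA, if_pos hmem2, hitemsB, List.map_map, h]
          refine List.map_congr_left ?_
          intro q hq
          by_cases hq1 : q.1 = shop
          · simp [Function.comp, hq1, hval q hq hq1, pv_ofList_snoc, hmem]
          · simp [Function.comp, hq1]
        · -- new pair: both append it
          have hmem2 : p ∉ PySem.List.dedup v := fun hx => hmem ((PySem.List.mem_dedup _ _).mp hx)
          rw [hA, if_neg hmem2, PySem.Dict.items_insert_of_contains _ _ hcA,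
            hitemsB, List.map_map, h, List.map_map]
          refine List.map_congr_left ?_
          intro q hq
          by_cases hq1 : q.1 = shop
          · simp [Function.comp, hq1, pv_ofList_snoc, hmem]
          · simp [Function.comp, hq1]
      · -- fresh shop key: both append a new entry
        have hc2 : dB.contains shop = false := by simpa using hc
        have hcA : dA.contains shop = false := by rw [hcont]; exact hc2
        have hgB : dB.getD shop [] = [] := PySem.Dict.getD_of_not_contains _ _ hc2
        have hcur : (if dA.contains shop = true then dA else dA.insert shop []) =
            dA.insert shop [] := by
          rw [if_neg (show ¬dA.contains shop = true by simp [hcA])]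
        have hA : pvStepA dA row = dA.insert shop [p] := by
          simp only [pvStepA]
          rw [← hshop, if_neg hsh, ← hp, hcur, PySem.Dict.getD_insert_self]
          simp [PySem.Dict.insert_insert_self]
        have hone : PySem.Set.ofList [p] = [p] := rfl
        rw [hA, hB, hgB, PySem.Dict.items_insert_of_not_contains _ _ hc2,
          PySem.Dict.items_insert_of_not_contains _ _ hcA, h, List.map_append]
        simp [hone]


-- ===== VERDICT (by name: the statement is the Claim_ definition above) =====
theorem get_unique_shops_spec : Claim_equal_get_unique_shops := by
  intro data _
  unfold Spec_get_unique_shops get_unique_shops get_unique_shops_alt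
  exact pv_fold_inv data PySem.Dict.empty PySem.Dict.empty
    (by simp [PySem.Dict.keys, PySem.Dict.empty]) (by rfl)
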